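-- pv_equiv track=rewrite | github.com/abhishekabhi779/SWE | ass5/HW 5 Gold Digger attached files Jun 25, 2024 406 PM/ans.py | find_zones
-- ===== SOURCE A (Python) =====
-- def calculate_zone_score(mine, left, right):
--     gold = "gold"
--     element_cnt = [0] * len(gold)
--     gold_cnt = 0
--     rock_cnt = 0
--
--     i = left
--     while i <= right:
--         if mine[i] in gold:
--             element_cnt[gold.index(mine[i])] += 1
--             if (right - i) >= 3:
--                 if (mine[i:i+4] == "gold") or (mine[i:i+4] == "dlog"):
--                     gold_cnt += 1
--                     i += 3
--         else:
--             rock_cnt += 1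
--         i += 1
--
--     return (4 * gold_cnt) + (4 * min(element_cnt)) - rock_cnt
--
-- def find_zones(mine, num_zones=5):
--     mine_length = len(mine)
--     zones = []
--     window_size = 2000
--     step_size = 500
--
--     for _ in range(num_zones):
--         best_score = float('-inf')
--         best_zone = None
--
--         for left in range(0, mine_length - window_size + 1, step_size):
--             right = left + window_size - 1
--             if any(left <= z[1] and right >= z[0] for z in zones):
--                 continue  # Skip if overlapping with existing zones
--
--             score = calculate_zone_score(mine, left, right)
--             if score > best_score:
--                 best_score = score
--                 best_zone = (left, right)
--
--         if best_zone:
--             zones.append(best_zone)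
--         else:
--             zones.append((0, 0))  # Add a dummy zone if none found
--
--     return zones
-- ===== SOURCE B (Python) =====
-- def calculate_zone_score(mine, left, right):
--     gold = "gold"
--     element_cnt = [0] * len(gold)
--     gold_cnt = 0
--     rock_cnt = 0
--
--     i = left
--     while i <= right:
--         if mine[i] in gold:
--             element_cnt[gold.index(mine[i])] += 1
--             if (right - i) >= 3:
--                 if (mine[i:i+4] == "gold") or (mine[i:i+4] == "dlog"):
--                     gold_cnt += 1
--                     i += 3
--         else:
--             rock_cnt += 1
--         i += 1
--
--     return (4 * gold_cnt) + (4 * min(element_cnt)) - rock_cnt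
--
-- def find_zones(mine, num_zones=5):
--     mine_length = len(mine)
--     window_size = 2000
--     step_size = 500
--
--     # score every window once, in increasing-left order
--     cands = [(calculate_zone_score(mine, left, left + window_size - 1),
--               left, left + window_size - 1)
--              for left in range(0, mine_length - window_size + 1, step_size)]
--     # best score first; ties by smaller left (matches A's first-max tie-break)
--     cands.sort(key=lambda t: (-t[0], t[1]))
--
--     zones = []
--     for _, left, right in cands:
--         if len(zones) >= num_zones:
--             break
--         if not any(left <= z[1] and right >= z[0] for z in zones):
--             zones.append((left, right))
--     while len(zones) < num_zones:
--         zones.append((0, 0))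
--     return zones
-- ===== Notes on version B (the rewrite author's own statement) =====
-- stated objective: faster
-- what changed: B scores each window once into a candidate list, stably sorts it by (-score, left) and picks non-overlapping zones in a single pass with (0,0) padding, instead of A's num_zones repeated full rescans (re-scoring every window each round) with a running strict-max.
import Mathlib
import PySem

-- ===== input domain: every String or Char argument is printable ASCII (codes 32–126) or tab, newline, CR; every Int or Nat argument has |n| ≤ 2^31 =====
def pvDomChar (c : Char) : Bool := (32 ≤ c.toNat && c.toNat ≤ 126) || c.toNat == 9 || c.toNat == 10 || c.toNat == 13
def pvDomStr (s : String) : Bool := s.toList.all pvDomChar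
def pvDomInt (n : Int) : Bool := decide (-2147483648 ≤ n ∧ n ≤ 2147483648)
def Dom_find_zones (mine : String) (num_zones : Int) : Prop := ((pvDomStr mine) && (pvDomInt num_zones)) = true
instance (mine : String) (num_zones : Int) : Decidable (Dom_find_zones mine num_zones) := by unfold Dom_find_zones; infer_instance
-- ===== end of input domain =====

-- B scores every window once, sorts candidates by (-score, left) and selects greedily in one pass,
-- replacing A's num_zones full rescans of the string (objective: faster, constant/asymptotic rescan removal).

-- ===== PORT A =====
-- shared helper: calculate_zone_score (identical in Source A and Source B)
-- while-loop state: (element_cnt, gold_cnt, rock_cnt, i), totalized with fuel = remaining iteration bound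
-- (i strictly increases, so the fuel-0 exit is never reached with the wrapper's fuel); the
-- float('-inf')/None sentinel pair of find_zones is rendered as one Option below.
def czsGo (s : List Char) (right : Int) (fuel : Nat) (cnt : List Int) (gold_cnt rock_cnt i : Int) : Int :=
  match fuel with
  | 0 => 4 * gold_cnt + 4 * ((PySem.List.min? cnt (fun x => x)).getD 0) - rock_cnt
  | fuel + 1 =>
    if i ≤ right then
      match PySem.List.pyGet? s i with
      | some c =>
        match PySem.List.index? "gold".toList c with
        | some idx =>                       -- mine[i] in gold; element_cnt[gold.index(mine[i])] += 1
          let cnt' := cnt.set idx (cnt.getD idx 0 + 1)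
          if right - i ≥ 3 then
            if PySem.List.slice s (some i) (some (i + 4)) = "gold".toList ∨
               PySem.List.slice s (some i) (some (i + 4)) = "dlog".toList then
              czsGo s right fuel cnt' (gold_cnt + 1) rock_cnt (i + 4)   -- i += 3 then i += 1
            else czsGo s right fuel cnt' gold_cnt rock_cnt (i + 1)
          else czsGo s right fuel cnt' gold_cnt rock_cnt (i + 1)
        | none => czsGo s right fuel cnt gold_cnt (rock_cnt + 1) (i + 1)
      | none =>
        -- Python would raise IndexError here; unreachable from find_zones (0 ≤ i ≤ right < len(mine));
        -- counted as rock only to keep the helper total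
        czsGo s right fuel cnt gold_cnt (rock_cnt + 1) (i + 1)
    else 4 * gold_cnt + 4 * ((PySem.List.min? cnt (fun x => x)).getD 0) - rock_cnt

def calculate_zone_score (mine : String) (left right : Int) : Int :=
  czsGo mine.toList right (right + 1 - left).toNat (List.replicate "gold".toList.length 0) 0 0 left

-- any(left <= z[1] and right >= z[0] for z in zones)  (identical test in Source A and Source B)
def fzBlocked (zones : List (Int × Int)) (left right : Int) : Bool :=
  zones.any (fun z => left ≤ z.2 && right ≥ z.1)

-- inner `for left in range(...)` loop of A: best_score/best_zone as one Option (score, left, right)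
def fzBest (mine : String) (zones : List (Int × Int)) : Option (Int × Int × Int) :=
  (PySem.List.pyRange 0 (PySem.Str.len mine - 2000 + 1) 500).foldl
    (fun best left =>
      let right := left + 2000 - 1
      if fzBlocked zones left right then best
      else
        let score := calculate_zone_score mine left right
        match best with
        | none => some (score, left, right)
        | some b => if score > b.1 then some (score, left, right) else some b)
    none

def find_zones (mine : String) (num_zones : Int) : List (Int × Int) :=
  (List.range num_zones.toNat).foldl
    (fun zones _ =>
      match fzBest mine zones with
      | some b => zones ++ [(b.2.1, b.2.2)]     -- zones.append(best_zone)
      | none => zones ++ [(0, 0)])              -- dummy zone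
    []

-- ===== PORT B =====
-- the candidate list comprehension of Source B
def fzCands (mine : String) : List (Int × Int × Int) :=
  (PySem.List.pyRange 0 (PySem.Str.len mine - 2000 + 1) 500).map
    (fun left => (calculate_zone_score mine left (left + 2000 - 1), left, left + 2000 - 1))

-- key=lambda t: (-t[0], t[1])  (Python tuple comparison = lexicographic)
def fzKey (c : Int × Int × Int) : Lex (Int × Int) := toLex (-c.1, c.2.1)

-- the selection `for`-loop of Source B (break when num_zones zones are picked)
def fzSelect (num_zones : Int) (zones : List (Int × Int)) : List (Int × Int × Int) → List (Int × Int)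
  | [] => zones
  | c :: rest =>
    if (zones.length : Int) ≥ num_zones then zones
    else if fzBlocked zones c.2.1 c.2.2 then fzSelect num_zones zones rest
    else fzSelect num_zones (zones ++ [(c.2.1, c.2.2)]) rest

def find_zones_alt (mine : String) (num_zones : Int) : List (Int × Int) :=
  let zones := fzSelect num_zones [] (PySem.List.sorted (fzCands mine) fzKey)
  zones ++ List.replicate (num_zones.toNat - zones.length) (0, 0)   -- the final while-padding

-- ===== PRECONDITION & SPEC =====
def Spec_find_zones (mine : String) (num_zones : Int) (out : List (Int × Int)) : Prop := out = find_zones_alt mine num_zones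
instance (mine : String) (num_zones : Int) (out : List (Int × Int)) : Decidable (Spec_find_zones mine num_zones out) := by unfold Spec_find_zones; infer_instance

-- ===== CLAIM (what is proved, stated in full; the proofs are below) =====
def Claim_equal_find_zones : Prop := ∀ (mine : String) (num_zones : Int), Dom_find_zones mine num_zones → Spec_find_zones mine num_zones (find_zones mine num_zones)

-- ===== LEMMAS AND PROOFS =====

-- proof-side vocabulary
def czone (c : Int × Int × Int) : Int × Int := (c.2.1, c.2.2)

def bk (zones : List (Int × Int)) (c : Int × Int × Int) : Bool := fzBlocked zones c.2.1 c.2.2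

-- A's inner fold, abstracted over a candidate list
def bestC (zones : List (Int × Int)) (cs : List (Int × Int × Int)) : Option (Int × Int × Int) :=
  cs.foldl
    (fun best c =>
      if bk zones c then best
      else match best with
        | none => some c
        | some b => if c.1 > b.1 then some c else some b)
    none

-- greedy selection with no count limit
def selAll (zones : List (Int × Int)) : List (Int × Int × Int) → List (Int × Int)
  | [] => zones
  | c :: rest => if bk zones c then selAll zones rest else selAll (zones ++ [czone c]) rest

-- first candidate not overlapping zones
def firstUnb (zones : List (Int × Int)) : List (Int × Int × Int) → Option (Int × Int × Int)
  | [] => none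
  | c :: rest => if bk zones c then firstUnb zones rest else some c

theorem bk_append (zones w : List (Int × Int)) (c : Int × Int × Int) :
    bk (zones ++ w) c = (bk zones c || bk w c) := by
  simp [bk, fzBlocked]

theorem bk_self (zones : List (Int × Int)) (c : Int × Int × Int) (h : c.2.1 ≤ c.2.2) :
    bk (zones ++ [czone c]) c = true := by
  simp [bk, fzBlocked, czone]
  omega

theorem fzBest_eq (mine : String) (zones : List (Int × Int)) :
    fzBest mine zones = bestC zones (fzCands mine) := by
  unfold fzBest bestC fzCands
  rw [List.foldl_map]
  rfl

theorem firstUnb_eq_none_iff (zones : List (Int × Int)) (s : List (Int × Int × Int)) :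
    firstUnb zones s = none ↔ ∀ c ∈ s, bk zones c = true := by
  induction s with
  | nil => simp [firstUnb]
  | cons c rest ih =>
    by_cases h : bk zones c
    · simp [firstUnb, h, ih]
    · simp [firstUnb, h]

theorem firstUnb_spec (zones : List (Int × Int)) (s : List (Int × Int × Int))
    (hp : s.Pairwise (fun a b => fzKey a ≤ fzKey b)) (c : Int × Int × Int)
    (h : firstUnb zones s = some c) :
    c ∈ s ∧ bk zones c = false ∧ ∀ y ∈ s, bk zones y = false → fzKey c ≤ fzKey y := by
  induction s with
  | nil => simp [firstUnb] at h
  | cons a rest ih =>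
    rw [List.pairwise_cons] at hp
    by_cases hb : bk zones a
    · rw [firstUnb, if_pos hb] at h
      obtain ⟨hm, hub, hmin⟩ := ih hp.2 h
      refine ⟨List.mem_cons_of_mem _ hm, hub, ?_⟩
      intro y hy hyub
      rcases List.mem_cons.1 hy with rfl | hy
      · simp [hb] at hyub
      · exact hmin y hy hyub
    · rw [firstUnb, if_neg hb] at h
      cases h
      refine ⟨List.mem_cons_self, by simpa using hb, ?_⟩
      intro y hy _
      rcases List.mem_cons.1 hy with rfl | hy
      · exact le_refl _
      · exact hp.1 y hy

theorem bestC_spec (zones : List (Int × Int)) (cs : List (Int × Int × Int))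
    (hp : cs.Pairwise (fun a b => a.2.1 < b.2.1)) :
    (bestC zones cs = none → ∀ y ∈ cs, bk zones y = true) ∧
    (∀ c, bestC zones cs = some c →
      c ∈ cs ∧ bk zones c = false ∧ ∀ y ∈ cs, bk zones y = false → fzKey c ≤ fzKey y) := by
  induction cs using List.reverseRecOn with
  | nil => simp [bestC]
  | append_singleton cs a ih =>
    rw [List.pairwise_append] at hp
    obtain ⟨hpcs, -, hlt⟩ := hp
    have ih := ih hpcs
    have hstep : bestC zones (cs ++ [a]) =
        (if bk zones a then bestC zones cs
         else match bestC zones cs with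
           | none => some a
           | some b => if a.1 > b.1 then some a else some b) := by
      simp [bestC, List.foldl_append]
    by_cases hb : bk zones a
    · rw [hstep, if_pos hb]
      constructor
      · intro hn y hy
        rcases List.mem_append.1 hy with hy | hy
        · exact ih.1 hn y hy
        · simp only [List.mem_singleton] at hy; subst hy; exact hb
      · intro c hc
        obtain ⟨hm, hub, hmin⟩ := ih.2 c hc
        refine ⟨List.mem_append_left _ hm, hub, ?_⟩
        intro y hy hyub
        rcases List.mem_append.1 hy with hy | hy
        · exact hmin y hy hyub
        · simp only [List.mem_singleton] at hy; subst hy; simp [hb] at hyub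
    · rw [hstep, if_neg hb]
      rcases hprev : bestC zones cs with _ | b
      · constructor
        · intro hn; simp at hn
        · intro c hc
          change some a = some c at hc; cases hc
          refine ⟨List.mem_append_right _ (List.mem_singleton_self _), by simpa using hb, ?_⟩
          intro y hy hyub
          rcases List.mem_append.1 hy with hy | hy
          · have := ih.1 hprev y hy; simp [this] at hyub
          · simp only [List.mem_singleton] at hy; subst hy; exact le_refl _
      · obtain ⟨hbm, hbub, hbmin⟩ := ih.2 b hprev
        have hbl : b.2.1 < a.2.1 := hlt b hbm a (List.mem_singleton_self _)
        constructor
        · intro hn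
          change (if a.1 > b.1 then some a else some b) = none at hn
          split at hn <;> simp at hn
        · intro c hc
          change (if a.1 > b.1 then some a else some b) = some c at hc
          by_cases hgt : a.1 > b.1
          · rw [if_pos hgt] at hc; cases hc
            refine ⟨List.mem_append_right _ (List.mem_singleton_self _), by simpa using hb, ?_⟩
            intro y hy hyub
            have hab : fzKey a ≤ fzKey b := by
              rw [fzKey, fzKey, Prod.Lex.le_iff]
              left; simpa using hgt
            rcases List.mem_append.1 hy with hy | hy
            · exact le_trans hab (hbmin y hy hyub)
            · simp only [List.mem_singleton] at hy; subst hy; exact le_refl _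
          · rw [if_neg hgt] at hc; cases hc
            refine ⟨List.mem_append_left _ hbm, hbub, ?_⟩
            intro y hy hyub
            rcases List.mem_append.1 hy with hy | hy
            · exact hbmin y hy hyub
            · simp only [List.mem_singleton] at hy; subst hy
              rw [fzKey, fzKey, Prod.Lex.le_iff]
              rcases lt_or_eq_of_le (not_lt.1 hgt) with hlt' | heq
              · left; simpa using hlt'
              · right; exact ⟨by simpa using congrArg Neg.neg heq.symm, le_of_lt hbl⟩

theorem key_inj (cs : List (Int × Int × Int))
    (hp : cs.Pairwise (fun a b => a.2.1 < b.2.1)) :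
    ∀ a ∈ cs, ∀ b ∈ cs, fzKey a = fzKey b → a = b := by
  have hnd : (cs.map (fun c => c.2.1)).Nodup :=
    List.pairwise_map.2 (hp.imp fun h => ne_of_lt h)
  intro a ha b hb hk
  have h21 : a.2.1 = b.2.1 := by
    have := congrArg (fun k => (ofLex k).2) hk
    simpa [fzKey] using this
  exact List.inj_on_of_nodup_map hnd ha hb h21

theorem fzRound_eq (zones : List (Int × Int)) (cs s : List (Int × Int × Int))
    (hp : cs.Pairwise (fun a b => a.2.1 < b.2.1))
    (hps : s.Pairwise (fun a b => fzKey a ≤ fzKey b))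
    (hperm : s.Perm cs) :
    bestC zones cs = firstUnb zones s := by
  have hspec := bestC_spec zones cs hp
  rcases hA : bestC zones cs with _ | c <;> rcases hF : firstUnb zones s with _ | d
  · rfl
  · obtain ⟨hm, hub, -⟩ := firstUnb_spec zones s hps d hF
    have := hspec.1 hA d (hperm.mem_iff.1 hm)
    simp [this] at hub
  · obtain ⟨hm, hub, -⟩ := hspec.2 c hA
    rw [firstUnb_eq_none_iff] at hF
    have := hF c (hperm.mem_iff.2 hm)
    simp [this] at hub
  · obtain ⟨hmc, hubc, hminc⟩ := hspec.2 c hA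
    obtain ⟨hmd, hubd, hmind⟩ := firstUnb_spec zones s hps d hF
    have hmd' : d ∈ cs := hperm.mem_iff.1 hmd
    have h1 : fzKey c ≤ fzKey d := hminc d hmd' hubd
    have h2 : fzKey d ≤ fzKey c := hmind c (hperm.mem_iff.2 hmc) hubc
    have := key_inj cs hp c hmc d hmd' (le_antisymm h1 h2)
    rw [this]

theorem selAll_extend (s : List (Int × Int × Int)) (zones : List (Int × Int)) :
    ∃ t, selAll zones s = zones ++ t := by
  induction s generalizing zones with
  | nil => exact ⟨[], (List.append_nil zones).symm⟩
  | cons c rest ih =>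
    by_cases hb : bk zones c
    · simp only [selAll, if_pos hb]; exact ih zones
    · simp only [selAll, if_neg hb]
      obtain ⟨t, ht⟩ := ih (zones ++ [czone c])
      exact ⟨czone c :: t, by simpa using ht⟩

theorem selAll_of_all_blocked (s : List (Int × Int × Int)) (zones : List (Int × Int))
    (h : ∀ c ∈ s, bk zones c = true) :
    selAll zones s = zones := by
  induction s with
  | nil => rfl
  | cons c rest ih =>
    simp only [selAll, if_pos (h c List.mem_cons_self)]
    exact ih fun x hx => h x (List.mem_cons_of_mem _ hx)

theorem selAll_cont_some (s : List (Int × Int × Int))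
    (hlr : ∀ c ∈ s, c.2.1 ≤ c.2.2) :
    ∀ (zones : List (Int × Int)) (c : Int × Int × Int), firstUnb zones s = some c →
      selAll zones s = selAll (zones ++ [czone c]) s := by
  induction s with
  | nil => intro zones c hF; simp [firstUnb] at hF
  | cons a rest ih =>
    intro zones c hF
    have hlr' : ∀ x ∈ rest, x.2.1 ≤ x.2.2 := fun x hx => hlr x (List.mem_cons_of_mem _ hx)
    by_cases hb : bk zones a
    · rw [firstUnb, if_pos hb] at hF
      have hb' : bk (zones ++ [czone c]) a = true := by
        rw [bk_append, hb, Bool.true_or]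
      simp only [selAll, if_pos hb, if_pos hb']
      exact ih hlr' zones c hF
    · rw [firstUnb, if_neg hb] at hF
      cases hF
      have hb' : bk (zones ++ [czone a]) a = true :=
        bk_self zones a (hlr a List.mem_cons_self)
      simp only [selAll, if_neg hb, if_pos hb']

theorem fzSelect_eq_take (num : Int) (s : List (Int × Int × Int)) (zones : List (Int × Int))
    (h : zones.length ≤ num.toNat) :
    fzSelect num zones s = (selAll zones s).take num.toNat := by
  induction s generalizing zones with
  | nil =>
    rw [fzSelect, selAll, List.take_of_length_le h]
  | cons c rest ih =>
    by_cases hge : (zones.length : Int) ≥ num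
    · have hlen : zones.length = num.toNat := by omega
      rw [fzSelect, if_pos hge]
      obtain ⟨t, ht⟩ := selAll_extend (c :: rest) zones
      rw [ht, ← hlen, List.take_left]
    · have hlt : zones.length < num.toNat := by omega
      by_cases hb : fzBlocked zones c.2.1 c.2.2 = true
      · rw [fzSelect, if_neg hge, if_pos hb]
        have hsel : selAll zones (c :: rest) = selAll zones rest := by
          simp only [selAll, bk, if_pos hb]
        rw [hsel]
        exact ih zones h
      · rw [fzSelect, if_neg hge, if_neg hb]
        have hsel : selAll zones (c :: rest) = selAll (zones ++ [(c.2.1, c.2.2)]) rest := by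
          simp only [selAll, bk, if_neg hb, czone]
        have h2 := ih (zones ++ [czone c]) (by simp [czone]; omega)
        simp only [czone] at h2
        rw [h2, hsel]

theorem foldl_range_const {α : Type} (g : α → α) (n : Nat) (init : α) :
    (List.range n).foldl (fun z _ => g z) init = g^[n] init := by
  induction n generalizing init with
  | zero => rfl
  | succ n ih =>
    rw [List.range_succ, List.foldl_append, ih, Function.iterate_succ_apply']
    rfl

theorem main_iterate (s : List (Int × Int × Int)) (hlr : ∀ c ∈ s, c.2.1 ≤ c.2.2)
    (n : Nat) (zones : List (Int × Int)) :
    (fun z => match firstUnb z s with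
       | some c => z ++ [(c.2.1, c.2.2)]
       | none => z ++ [(0, 0)])^[n] zones =
      if zones.length + n ≤ (selAll zones s).length
      then (selAll zones s).take (zones.length + n)
      else selAll zones s ++ List.replicate (zones.length + n - (selAll zones s).length) (0, 0) := by
  induction n generalizing zones with
  | zero =>
    obtain ⟨t, ht⟩ := selAll_extend s zones
    simp only [Function.iterate_zero, id_eq, Nat.add_zero, ht]
    rw [if_pos (by simp), List.take_left]
  | succ n ih =>
    rw [Function.iterate_succ_apply]
    rcases hF : firstUnb zones s with _ | c
    · -- nothing available: selAll zones s = zones, and it stays that way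
      have hsel : selAll zones s = zones :=
        selAll_of_all_blocked s zones ((firstUnb_eq_none_iff zones s).1 hF)
      have hF' : firstUnb (zones ++ [((0 : Int), (0 : Int))]) s = none := by
        rw [firstUnb_eq_none_iff] at hF ⊢
        intro y hy; rw [bk_append, hF y hy, Bool.true_or]
      have hsel' : selAll (zones ++ [((0 : Int), (0 : Int))]) s = zones ++ [(0, 0)] :=
        selAll_of_all_blocked s _ ((firstUnb_eq_none_iff _ s).1 hF')
      rw [ih (zones ++ [(0, 0)]), hsel', hsel]
      simp only [List.length_append, List.length_singleton]
      by_cases hn : n = 0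
      · subst hn; rw [if_pos (by omega), if_neg (by omega)]
        simp [List.take_of_length_le]
      · rw [if_neg (by omega), if_neg (by omega)]
        have : zones.length + 1 + n - (zones.length + 1) = n := by omega
        have h2 : zones.length + (n + 1) - zones.length = n + 1 := by omega
        rw [this, h2, List.append_assoc]
        simp [List.replicate_succ]
    · have hsel : selAll zones s = selAll (zones ++ [czone c]) s :=
        selAll_cont_some s hlr zones c hF
      simp only [czone] at hsel
      rw [ih (zones ++ [(c.2.1, c.2.2)]), ← hsel]
      simp only [List.length_append, List.length_singleton]
      have : zones.length + 1 + n = zones.length + (n + 1) := by omega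
      rw [this]

-- candidate list facts
theorem fzCands_pairwise (mine : String) :
    (fzCands mine).Pairwise (fun a b => a.2.1 < b.2.1) := by
  rw [fzCands, List.pairwise_map]
  rw [PySem.List.pyRange_of_pos 0 _ (by norm_num : (0:Int) < 500), List.pairwise_map]
  exact List.pairwise_lt_range.imp (by intro a b h; simp; omega)

theorem fzCands_lr (mine : String) : ∀ c ∈ fzCands mine, c.2.1 ≤ c.2.2 := by
  rw [fzCands]
  intro c hc
  obtain ⟨l, -, rfl⟩ := List.mem_map.1 hc
  show (l : Int) ≤ l + 2000 - 1
  omega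

-- ===== VERDICT (by name: the statement is the Claim_ definition above) =====
theorem find_zones_spec : Claim_equal_find_zones := by
  intro mine num_zones _
  show find_zones mine num_zones = find_zones_alt mine num_zones
  have hp := fzCands_pairwise mine
  have hlr := fzCands_lr mine
  set cs := fzCands mine with hcs
  set s := PySem.List.sorted cs fzKey with hs
  have hperm : s.Perm cs := PySem.List.sorted_perm cs fzKey false
  have hps : s.Pairwise (fun a b => fzKey a ≤ fzKey b) := PySem.List.sorted_pairwise cs fzKey
  have hlrs : ∀ c ∈ s, c.2.1 ≤ c.2.2 := fun c hc => hlr c (hperm.mem_iff.1 hc)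
  have hround : ∀ z, fzBest mine z = firstUnb z s := fun z => by
    rw [fzBest_eq, ← hcs, fzRound_eq z cs s hp hps hperm]
  -- A side
  rw [find_zones]
  simp only [hround]
  rw [foldl_range_const, main_iterate s hlrs num_zones.toNat []]
  -- B side
  rw [find_zones_alt]
  simp only [← hcs, ← hs]
  rw [fzSelect_eq_take num_zones s [] (by simp)]
  simp only [List.length_nil, Nat.zero_add, List.length_take]
  by_cases hle : num_zones.toNat ≤ (selAll [] s).length
  · rw [if_pos hle]
    have : min num_zones.toNat (selAll [] s).length = num_zones.toNat := by omega
    rw [this, Nat.sub_self]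
    simp
  · rw [if_neg hle]
    have h1 : (selAll [] s).take num_zones.toNat = selAll [] s :=
      List.take_of_length_le (by omega)
    have h2 : min num_zones.toNat (selAll [] s).length = (selAll [] s).length := by omega
    rw [h1, h2]
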